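-- pv_equiv track=rewrite | github.com/teebow1e/ml-knowledge | outliers-generator/csv_password_gen.py | calculate_sequence_character
-- ===== SOURCE A (Python) =====
-- def calculate_sequence_character(password):
--     Alphabet = "abcdefghijklmnopqrstuvwxyz"
--     Number = "0123456789"
--     count = 0
--     for s in range (len(Alphabet) - 2):
--         AlphaFwd = Alphabet[s : s + 3]
--         AlphaRev = AlphaFwd[::-1]
--         if AlphaFwd in password.lower() or AlphaRev in password.lower():
--             count += 1
--
--     for s in range (len(Number) - 2):
--         NumFwd = Number[s : s + 3]
--         NumRev = NumFwd[::-1]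
--         if NumFwd in password.lower() or NumRev in password.lower():
--             count += 1
--
--     return count
-- ===== SOURCE B (Python) =====
-- def _canon(a, b, c):
--     """Canonical forward triple if a,b,c are three consecutive lowercase letters
--     or digits (ascending or descending), else None."""
--     oa, ob, oc = ord(a), ord(b), ord(c)
--     if ob == oa + 1 and oc == ob + 1 and (
--             (97 <= oa and oc <= 122) or (48 <= oa and oc <= 57)):
--         return a + b + c
--     if ob + 1 == oa and oc + 1 == ob and (
--             (97 <= oc and oa <= 122) or (48 <= oc and oa <= 57)):
--         return c + b + a
--     return None
--
-- def calculate_sequence_character(password):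
--     p = password.lower()
--     found = set()
--     for a, b, c in zip(p, p[1:], p[2:]):
--         t = _canon(a, b, c)
--         if t is not None:
--             found.add(t)
--     return len(found)
-- ===== Notes on version B (the rewrite author's own statement) =====
-- stated objective: alternative
-- what changed: A tests each of the 32 candidate triples (24 alphabet, 8 digit, forward and reversed) as a substring of password.lower(); B makes a single sliding-window pass over password.lower(), canonicalizing each consecutive ascending/descending run of 3 letters or digits into a set and returning the set's size.
import Mathlib
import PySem

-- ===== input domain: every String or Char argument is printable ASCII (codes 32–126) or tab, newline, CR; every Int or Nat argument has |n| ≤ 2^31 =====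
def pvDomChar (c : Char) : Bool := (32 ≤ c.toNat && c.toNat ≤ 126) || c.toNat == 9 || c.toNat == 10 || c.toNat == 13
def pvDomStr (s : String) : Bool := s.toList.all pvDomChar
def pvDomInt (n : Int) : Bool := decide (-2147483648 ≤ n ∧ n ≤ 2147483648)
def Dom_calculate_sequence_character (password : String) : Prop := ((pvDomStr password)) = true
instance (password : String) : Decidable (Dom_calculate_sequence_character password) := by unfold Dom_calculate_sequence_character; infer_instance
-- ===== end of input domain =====

-- B replaces A's 32 per-pattern substring scans of password.lower() by one sliding-window
-- pass collecting canonical triples in a set (objective: alternative algorithm, same result).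


-- ===== PORT A =====
-- literal transliteration: two index loops, Alphabet[s:s+3] / Number[s:s+3], the [::-1]
-- reverse slice, and a substring ('in') test against password.lower() on each iteration
def calculate_sequence_character (password : String) : Int :=
  let alphabet : List Char := "abcdefghijklmnopqrstuvwxyz".toList
  let number : List Char := "0123456789".toList
  let count : Int := 0
  let count := (PySem.List.pyRange 0 ((alphabet.length : Int) - 2) 1).foldl (fun count s =>
    let alphaFwd := PySem.List.slice alphabet (some s) (some (s + 3))
    let alphaRev := ((PySem.List.slice? alphaFwd none none (-1)).getD [])
    if PySem.Chars.isIn alphaFwd (PySem.Chars.lower password.toList) ||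
       PySem.Chars.isIn alphaRev (PySem.Chars.lower password.toList) then count + 1 else count) count
  let count := (PySem.List.pyRange 0 ((number.length : Int) - 2) 1).foldl (fun count s =>
    let numFwd := PySem.List.slice number (some s) (some (s + 3))
    let numRev := ((PySem.List.slice? numFwd none none (-1)).getD [])
    if PySem.Chars.isIn numFwd (PySem.Chars.lower password.toList) ||
       PySem.Chars.isIn numRev (PySem.Chars.lower password.toList) then count + 1 else count) count
  count

-- ===== PORT B =====
-- helper _canon(a, b, c) of Source B (ord(x) ported as Char.toNat)
def cscCanon (a b c : Char) : Option (List Char) :=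
  if b.toNat = a.toNat + 1 ∧ c.toNat = b.toNat + 1 ∧
     ((97 ≤ a.toNat ∧ c.toNat ≤ 122) ∨ (48 ≤ a.toNat ∧ c.toNat ≤ 57)) then some [a, b, c]
  else if b.toNat + 1 = a.toNat ∧ c.toNat + 1 = b.toNat ∧
     ((97 ≤ c.toNat ∧ a.toNat ≤ 122) ∨ (48 ≤ c.toNat ∧ a.toNat ≤ 57)) then some [c, b, a]
  else none

-- 'Good a b c': [a,b,c] is a canonical ascending triple of letters or digits

-- zip(p, p[1:], p[2:]) ported as (p.zip (p.drop 1)).zip (p.drop 2) (exact: drop = [k:] for k ≥ 0)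
def calculate_sequence_character_alt (password : String) : Int :=
  let p := PySem.Chars.lower password.toList
  let windows := (p.zip (p.drop 1)).zip (p.drop 2)
  let found : PySem.Set (List Char) := windows.foldl (fun s w =>
    match cscCanon w.1.1 w.1.2 w.2 with
    | some t => PySem.Set.add s t
    | none => s) PySem.Set.empty
  (found.length : Int)

-- ===== PRECONDITION & SPEC =====
def Spec_calculate_sequence_character (password : String) (out : Int) : Prop := out = calculate_sequence_character_alt password
instance (password : String) (out : Int) : Decidable (Spec_calculate_sequence_character password out) := by unfold Spec_calculate_sequence_character; infer_instance

-- ===== CLAIM (what is proved, stated in full; the proofs are below) =====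
def Claim_equal_calculate_sequence_character : Prop := ∀ (password : String), Dom_calculate_sequence_character password → Spec_calculate_sequence_character password (calculate_sequence_character password)

-- ===== LEMMAS AND PROOFS =====
-- Both counts equal 'countP P C' where C is the 32 candidate triples (24 alphabet + 8 digit
-- slices) and P t = (t or t.reverse is a substring of password.lower()); B's set is shown to
-- be a permutation of C.filter P via the window/infix correspondence.
abbrev cscGood (a b c : Char) : Prop :=
  b.toNat = a.toNat + 1 ∧ c.toNat = b.toNat + 1 ∧
    ((97 ≤ a.toNat ∧ c.toNat ≤ 122) ∨ (48 ≤ a.toNat ∧ c.toNat ≤ 57))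

def cscWin : List Char → List ((Char × Char) × Char)
  | a :: b :: c :: l => ((a, b), c) :: cscWin (b :: c :: l)
  | _ => []

def cscE (l : List Char) : List (List Char) :=
  (cscWin l).filterMap (fun w => cscCanon w.1.1 w.1.2 w.2)

lemma csc_zip_eq_win (l : List Char) : (l.zip (l.drop 1)).zip (l.drop 2) = cscWin l := by
  fun_induction cscWin l with
  | case1 a b c l ih => simpa [cscWin] using ih
  | case2 l h => match l with
    | [] => rfl
    | [a] => rfl
    | [a, b] => rfl
    | a :: b :: c :: l => exact absurd rfl (h a b c l)

lemma csc_mem_win {a b c : Char} {l : List Char} :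
    ((a, b), c) ∈ cscWin l ↔ [a, b, c] <:+: l := by
  fun_induction cscWin l with
  | case1 x y z l ih =>
    rw [List.infix_cons_iff]
    have hpre : ([a, b, c] <+: x :: y :: z :: l) ↔ (a = x ∧ b = y ∧ c = z) := by
      simp [List.cons_prefix_cons]
    simp only [List.mem_cons, ih, hpre, Prod.mk.injEq]
    tauto
  | case2 l h =>
    constructor
    · simp
    · intro hinf
      have hlen := hinf.length_le
      match l, h with
      | [], _ => simp at hlen
      | [x], _ => simp at hlen
      | [x, y], _ => simp at hlen
      | x :: y :: z :: l, h => exact absurd rfl (h x y z l)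

lemma csc_canon_eq_some_iff {a b c : Char} (hG : cscGood a b c) (x y z : Char) :
    cscCanon x y z = some [a, b, c] ↔ ((x, y), z) = ((a, b), c) ∨ ((x, y), z) = ((c, b), a) := by
  obtain ⟨hb, hc, hr⟩ := hG
  unfold cscCanon
  split_ifs with h1 h2 <;>
    simp only [Option.some.injEq, List.cons.injEq, and_true, Prod.mk.injEq,
      false_iff, not_or]
  · constructor
    · rintro ⟨rfl, rfl, rfl⟩; tauto
    · rintro (⟨⟨rfl, rfl⟩, rfl⟩ | ⟨⟨rfl, rfl⟩, rfl⟩)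
      · tauto
      · omega
  · constructor
    · rintro ⟨rfl, rfl, rfl⟩; tauto
    · rintro (⟨⟨rfl, rfl⟩, rfl⟩ | ⟨⟨rfl, rfl⟩, rfl⟩)
      · omega
      · tauto
  · constructor
    · rintro ⟨⟨rfl, rfl⟩, rfl⟩; omega
    · rintro ⟨⟨rfl, rfl⟩, rfl⟩; omega

lemma csc_canon_some_shape {x y z : Char} {t : List Char} (h : cscCanon x y z = some t) :
    ∃ a b c, t = [a, b, c] ∧ cscGood a b c := by
  unfold cscCanon at h
  split_ifs at h with h1 h2
  · exact ⟨x, y, z, (Option.some.injEq .. ▸ h).symm, h1⟩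
  · exact ⟨z, y, x, (Option.some.injEq .. ▸ h).symm, by unfold cscGood; omega⟩

lemma csc_mem_E_iff {l : List Char} {t : List Char} :
    t ∈ cscE l ↔ ∃ a b c, t = [a, b, c] ∧ cscGood a b c ∧
      ([a, b, c] <:+: l ∨ [c, b, a] <:+: l) := by
  constructor
  · intro ht
    obtain ⟨w, hw, hcan⟩ := List.mem_filterMap.mp ht
    obtain ⟨a, b, c, rfl, hG⟩ := csc_canon_some_shape hcan
    refine ⟨a, b, c, rfl, hG, ?_⟩
    rcases (csc_canon_eq_some_iff hG w.1.1 w.1.2 w.2).mp hcan with h | h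
    · left; rw [← csc_mem_win]; simpa [← h]
    · right; rw [← csc_mem_win]; simpa [← h]
  · rintro ⟨a, b, c, rfl, hG, hinf | hinf⟩
    · exact List.mem_filterMap.mpr ⟨((a, b), c), csc_mem_win.mpr hinf,
        (csc_canon_eq_some_iff hG a b c).mpr (Or.inl rfl)⟩
    · exact List.mem_filterMap.mpr ⟨((c, b), a), csc_mem_win.mpr hinf,
        (csc_canon_eq_some_iff hG c b a).mpr (Or.inr rfl)⟩

def cscAlphabet : List Char := "abcdefghijklmnopqrstuvwxyz".toList

def cscNumber : List Char := "0123456789".toList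

def cscP (l t : List Char) : Bool := PySem.Chars.isIn t l || PySem.Chars.isIn t.reverse l

def cscC : List (List Char) :=
  (PySem.List.pyRange 0 24 1).map (fun s => PySem.List.slice cscAlphabet (some s) (some (s + 3))) ++
  (PySem.List.pyRange 0 8 1).map (fun s => PySem.List.slice cscNumber (some s) (some (s + 3)))

def cscGoodB (t : List Char) : Bool :=
  match t with
  | [a, b, c] => decide (cscGood a b c)
  | _ => false

lemma csc_goodB_shape {t : List Char} (h : cscGoodB t = true) :
    ∃ a b c, t = [a, b, c] ∧ cscGood a b c := by
  match t, h with
  | [a, b, c], h => exact ⟨a, b, c, rfl, of_decide_eq_true h⟩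

lemma cscC_nodup : cscC.Nodup := by decide

lemma cscC_good : ∀ t ∈ cscC, cscGoodB t = true := by decide

lemma char_eq_ofNat {c : Char} {n : Nat} (h : c.toNat = n) : c = Char.ofNat n := by
  subst h; exact (Char.ofNat_toNat c).symm

lemma csc_good_mem_C {a b c : Char} (hG : cscGood a b c) : [a, b, c] ∈ cscC := by
  obtain ⟨hb, hc, hr⟩ := hG
  rcases hr with ⟨h1, h2⟩ | ⟨h1, h2⟩
  · refine List.mem_append.mpr (Or.inl (List.mem_map.mpr ⟨((a.toNat - 97 : Nat) : Int), ?_, ?_⟩))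
    · rw [PySem.List.mem_pyRange_one]; omega
    · rw [show ((((a.toNat - 97 : Nat)) : Int) + 3) = (((a.toNat - 97) + 3 : Nat) : Int) by push_cast; ring,
        PySem.List.slice_natCast]
      rw [char_eq_ofNat (show a.toNat = 97 + (a.toNat - 97) from by omega),
        char_eq_ofNat (show b.toNat = 98 + (a.toNat - 97) from by omega),
        char_eq_ofNat (show c.toNat = 99 + (a.toNat - 97) from by omega)]
      have hk : a.toNat - 97 < 24 := by omega
      revert hk
      generalize a.toNat - 97 = k
      intro hk
      revert k
      decide
  · refine List.mem_append.mpr (Or.inr (List.mem_map.mpr ⟨((a.toNat - 48 : Nat) : Int), ?_, ?_⟩))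
    · rw [PySem.List.mem_pyRange_one]; omega
    · rw [show ((((a.toNat - 48 : Nat)) : Int) + 3) = (((a.toNat - 48) + 3 : Nat) : Int) by push_cast; ring,
        PySem.List.slice_natCast]
      rw [char_eq_ofNat (show a.toNat = 48 + (a.toNat - 48) from by omega),
        char_eq_ofNat (show b.toNat = 49 + (a.toNat - 48) from by omega),
        char_eq_ofNat (show c.toNat = 50 + (a.toNat - 48) from by omega)]
      have hk : a.toNat - 48 < 8 := by omega
      revert hk
      generalize a.toNat - 48 = k
      intro hk
      revert k
      decide

lemma csc_set_perm (l : List Char) :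
    (PySem.Set.ofList (cscE l)).Perm (cscC.filter (cscP l)) := by
  refine (List.perm_ext_iff_of_nodup (PySem.Set.nodup_ofList _) (cscC_nodup.filter _)).mpr ?_
  intro t
  rw [PySem.Set.mem_ofList, List.mem_filter]
  constructor
  · intro ht
    obtain ⟨a, b, c, rfl, hG, hinf⟩ := csc_mem_E_iff.mp ht
    refine ⟨csc_good_mem_C hG, ?_⟩
    simp only [cscP, Bool.or_eq_true, PySem.Chars.isIn_iff_infix]
    simpa using hinf
  · rintro ⟨htC, hP⟩
    obtain ⟨a, b, c, rfl, hG⟩ := csc_goodB_shape (cscC_good t htC)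
    refine csc_mem_E_iff.mpr ⟨a, b, c, rfl, hG, ?_⟩
    simp only [cscP, Bool.or_eq_true, PySem.Chars.isIn_iff_infix] at hP
    simpa using hP

lemma csc_foldl_add (ws : List ((Char × Char) × Char)) (s : PySem.Set (List Char)) :
    ws.foldl (fun s w => match cscCanon w.1.1 w.1.2 w.2 with
      | some t => PySem.Set.add s t
      | none => s) s
    = (ws.filterMap (fun w => cscCanon w.1.1 w.1.2 w.2)).foldl PySem.Set.add s := by
  induction ws generalizing s with
  | nil => rfl
  | cons w ws ih => cases h : cscCanon w.1.1 w.1.2 w.2 <;> simp [h, ih]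

lemma csc_A_eq (password : String) :
    calculate_sequence_character password
      = (cscC.countP (cscP (PySem.Chars.lower password.toList)) : Int) := by
  unfold calculate_sequence_character
  dsimp only
  simp only [PySem.List.slice?_none_none_neg_one, Option.getD_some]
  rw [PySem.List.foldl_if_add_one, PySem.List.foldl_if_add_one, zero_add]
  rw [show ((("abcdefghijklmnopqrstuvwxyz".toList).length : Int) - 2) = 24 from by decide,
      show ((("0123456789".toList).length : Int) - 2) = 8 from by decide]
  rw [cscC, List.countP_append, Nat.cast_add, List.countP_map, List.countP_map]
  rfl

lemma csc_B_eq (password : String) :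
    calculate_sequence_character_alt password
      = (cscC.countP (cscP (PySem.Chars.lower password.toList)) : Int) := by
  unfold calculate_sequence_character_alt
  dsimp only
  rw [csc_zip_eq_win, csc_foldl_add]
  have h1 : (((cscWin (PySem.Chars.lower password.toList)).filterMap
      (fun w => cscCanon w.1.1 w.1.2 w.2)).foldl PySem.Set.add PySem.Set.empty)
      = PySem.Set.ofList (cscE (PySem.Chars.lower password.toList)) :=
    (PySem.Set.ofList_eq_foldl _).symm
  rw [h1, (csc_set_perm _).length_eq, ← List.countP_eq_length_filter]


-- ===== VERDICT (by name: the statement is the Claim_ definition above) =====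
theorem calculate_sequence_character_spec : Claim_equal_calculate_sequence_character := by
  intro password _
  unfold Spec_calculate_sequence_character
  rw [csc_A_eq, csc_B_eq]
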